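-- pv_equiv track=rewrite | github.com/bjourne/musicgen | musicgen/mycode.py | guess_initial_note
-- ===== SOURCE A (Python) =====
-- INSN_PLAY = 'P'
--
-- def guess_initial_note(sample):
--     at_note = 0
--     min_note = 0
--     max_note = 0
--     for cmd, arg in sample:
--         if cmd == INSN_PLAY:
--             at_note += arg
--             max_note = max(at_note, max_note)
--             min_note = min(at_note, min_note)
--     return -min_note + 12
-- ===== SOURCE B (Python) =====
-- INSN_PLAY = 'P'
--
-- def guess_initial_note(sample):
--     # Backwards scan: best = min over the (possibly empty) prefixes of the
--     # remaining play-args of their sum; recurrence best -> min(0, arg + best).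
--     # No running note position or explicit prefix sums are ever computed.
--     best = 0
--     for cmd, arg in reversed(sample):
--         if cmd == INSN_PLAY:
--             best = min(0, arg + best)
--     return -best + 12
-- ===== Notes on version B (the rewrite author's own statement) =====
-- stated objective: alternative
-- what changed: Replaces the forward loop that tracks a running note position with a running minimum (and dead max tracking) by a backwards scan over the sample using the suffix recurrence best = min(0, arg + best), which never materialises a running sum or any prefix sum.
import Mathlib
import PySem

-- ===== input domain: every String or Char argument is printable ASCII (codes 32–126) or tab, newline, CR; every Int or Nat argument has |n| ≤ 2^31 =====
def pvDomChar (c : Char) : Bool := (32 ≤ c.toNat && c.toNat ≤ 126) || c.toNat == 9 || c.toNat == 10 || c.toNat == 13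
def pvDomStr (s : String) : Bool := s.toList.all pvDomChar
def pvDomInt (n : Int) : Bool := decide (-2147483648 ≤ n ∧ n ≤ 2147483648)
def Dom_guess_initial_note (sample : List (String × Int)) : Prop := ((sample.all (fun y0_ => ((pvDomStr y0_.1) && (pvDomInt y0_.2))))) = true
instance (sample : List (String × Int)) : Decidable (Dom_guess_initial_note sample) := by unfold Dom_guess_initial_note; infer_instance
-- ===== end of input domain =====

-- B replaces the forward running-position/running-min loop (with dead max tracking)
-- by a backwards scan using the suffix recurrence best = min(0, arg + best); same values, same cost.

-- ===== PORT A =====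
-- port of A's loop: state is (at_note, max_note, min_note)
def guess_initial_note (sample : List (String × Int)) : Int :=
  let s := sample.foldl
    (fun (st : Int × Int × Int) p =>
      if p.1 == "P" then
        (st.1 + p.2, max (st.1 + p.2) st.2.1, min (st.1 + p.2) st.2.2)
      else st)
    (0, 0, 0) ;
  -s.2.2 + 12

-- ===== PORT B =====
-- B's loop over reversed(sample): a right fold over the list
def guess_initial_note_alt (sample : List (String × Int)) : Int :=
  let best := sample.foldr
    (fun p (best : Int) => if p.1 == "P" then min 0 (p.2 + best) else best) 0 ;
  -best + 12

-- ===== PRECONDITION & SPEC =====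
def Spec_guess_initial_note (sample : List (String × Int)) (out : Int) : Prop := out = guess_initial_note_alt sample
instance (sample : List (String × Int)) (out : Int) : Decidable (Spec_guess_initial_note sample out) := by unfold Spec_guess_initial_note; infer_instance

-- ===== CLAIM (what is proved, stated in full; the proofs are below) =====
def Claim_equal_guess_initial_note : Prop := ∀ (sample : List (String × Int)), Dom_guess_initial_note sample → Spec_guess_initial_note sample (guess_initial_note sample)

-- ===== LEMMAS AND PROOFS =====
-- B's suffix quantity is never positive
theorem pv_best_nonpos (sample : List (String × Int)) :
    sample.foldr (fun p (best : Int) => if p.1 == "P" then min 0 (p.2 + best) else best) 0 ≤ 0 := by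
  induction sample with
  | nil => simp
  | cons h t ih =>
    simp only [List.foldr_cons]
    split_ifs
    · exact min_le_left _ _
    · exact ih

-- A's min-component from state (at_, mx, mn) with mn ≤ at_ equals mn ⊓ (at_ + B's suffix value)
theorem pv_key (sample : List (String × Int)) (at_ mx mn : Int) (h : mn ≤ at_) :
    (sample.foldl
      (fun (st : Int × Int × Int) p =>
        if p.1 == "P" then
          (st.1 + p.2, max (st.1 + p.2) st.2.1, min (st.1 + p.2) st.2.2)
        else st)
      (at_, mx, mn)).2.2
    = min mn (at_ + sample.foldr (fun p (best : Int) => if p.1 == "P" then min 0 (p.2 + best) else best) 0) := by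
  induction sample generalizing at_ mx mn with
  | nil => simp [h]
  | cons hd t ih =>
    simp only [List.foldl_cons, List.foldr_cons]
    by_cases hc : (hd.1 == "P") = true
    · simp only [if_pos hc]
      rw [ih _ _ _ (min_le_left _ _)]
      have hb := pv_best_nonpos t
      -- both sides are mins over the same three quantities
      rw [min_comm (at_ + hd.2) mn]
      have : at_ + min 0 (hd.2 + t.foldr (fun p (best : Int) => if p.1 == "P" then min 0 (p.2 + best) else best) 0)
           = min at_ (at_ + hd.2 + t.foldr (fun p (best : Int) => if p.1 == "P" then min 0 (p.2 + best) else best) 0) := by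
        rcases min_cases (0 : Int) (hd.2 + t.foldr (fun p (best : Int) => if p.1 == "P" then min 0 (p.2 + best) else best) 0) with ⟨he, hle⟩ | ⟨he, hle⟩ <;> rw [he] <;> omega
      rw [this]
      omega
    · simp only [if_neg hc]
      exact ih at_ mx mn h

-- ===== VERDICT (by name: the statement is the Claim_ definition above) =====
theorem guess_initial_note_spec : Claim_equal_guess_initial_note := by
  intro sample _
  unfold Spec_guess_initial_note guess_initial_note guess_initial_note_alt
  simp only
  rw [pv_key sample 0 0 0 le_rfl, zero_add]
  have := pv_best_nonpos sample
  omega
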